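-- pv_equiv track=rewrite | github.com/robertbrandl/CS-115-Intro-to-CS | hw2.py | stringFromLetters
-- ===== SOURCE A (Python) =====
-- def letInWord(letters, wordLet):
--     '''determines if the letter of a word matches a letter in Rack'''
--     if letters == []:
--         return ''
--     elif wordLet in letters:
--         return wordLet
--     else:
--         return ''
--
-- def removeLetter(e, L, repeat):
--     '''removes specified letter from the list of letters, repeat acts a boolean to prevent multiple letters form being deleted'''
--     if L == []:
--         return []
--     else:
--         x = [L[0]]
--         if L[0] == e and repeat == False:
--             repeat = True
--             x = []
--         return x + removeLetter(e,L[1:], repeat)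
--
-- def stringFromLetters(string, letters):
--     '''determines what from the string can be made from the letters'''
--     if string == '' or letters == '':
--         return ''
--     elif letInWord(letters,string[0]) == string[0]:
--         letters = removeLetter(string[0],letters, False)
--         return string[0] + stringFromLetters(string[1:],letters)
--     else:
--         return ''
-- ===== SOURCE B (Python) =====
-- def stringFromLetters(string, letters):
--     '''determines what from the string can be made from the letters'''
--     counts = {}
--     for x in letters:
--         counts[x] = counts.get(x, 0) + 1
--     result = []
--     for c in string:
--         if counts.get(c, 0) > 0:
--             counts[c] = counts[c] - 1
--             result.append(c)
--         else:
--             break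
--     return ''.join(result)
-- ===== Notes on version B (the rewrite author's own statement) =====
-- stated objective: faster
-- what changed: Replaced A's double recursion (restring slicing per character plus a recursive list rebuild for every removed letter) by one pass that builds a count dictionary of the letters and then greedily decrements counts while scanning the string.
import Mathlib
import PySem

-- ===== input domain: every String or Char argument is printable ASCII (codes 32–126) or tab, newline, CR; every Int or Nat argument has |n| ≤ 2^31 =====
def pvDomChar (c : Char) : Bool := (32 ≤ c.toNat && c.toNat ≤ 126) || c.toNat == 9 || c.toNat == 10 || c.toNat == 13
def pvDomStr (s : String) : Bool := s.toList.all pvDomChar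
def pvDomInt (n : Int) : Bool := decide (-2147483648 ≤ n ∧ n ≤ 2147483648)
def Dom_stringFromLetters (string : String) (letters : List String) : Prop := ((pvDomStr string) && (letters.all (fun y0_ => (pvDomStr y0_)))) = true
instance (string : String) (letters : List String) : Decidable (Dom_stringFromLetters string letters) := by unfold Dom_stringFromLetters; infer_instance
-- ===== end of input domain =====

-- B replaces A's double recursion by building a letter-count dictionary once and
-- greedily decrementing counts in a single scan of the string (asymptotically faster).

-- ===== PORT A =====
def letInWord (letters : List String) (wordLet : String) : String :=
  if letters = [] then "" else if wordLet ∈ letters then wordLet else ""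

def removeLetter (e : String) (L : List String) (rep : Bool) : List String :=
  match L with
  | [] => []
  | h :: t =>
    -- x = [L[0]]; if L[0] == e and repeat == False: repeat = True; x = []; return x + removeLetter(e, L[1:], repeat)
    if h = e ∧ rep = false then removeLetter e t true
    else h :: removeLetter e t rep

-- recursion over the string's characters; builds the result as a character list
def sflA : List Char → List String → List Char
  | [], _ => []
  | c :: rest, letters =>
    if letInWord letters (String.ofList [c]) = String.ofList [c] then
      c :: sflA rest (removeLetter (String.ofList [c]) letters false)
    else []

def stringFromLetters (string : String) (letters : List String) : String :=
  -- the Python test `letters == ''` compares a list with a string and is always False here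
  String.ofList (sflA string.toList letters)

-- ===== PORT B =====
-- the for-loop with break over the string, carrying counts and the result list
def sflBloop : List Char → PySem.Dict String Int → List Char → List Char
  | [], _, result => result
  | c :: rest, counts, result =>
    if counts.getD (String.ofList [c]) 0 > 0 then
      sflBloop rest (counts.insert (String.ofList [c]) (counts.getD (String.ofList [c]) 0 - 1)) (result ++ [c])
    else result

def stringFromLetters_alt (string : String) (letters : List String) : String :=
  let counts := letters.foldl (fun d x => d.insert x (d.getD x 0 + 1)) PySem.Dict.empty
  String.ofList (sflBloop string.toList counts [])

-- ===== PRECONDITION & SPEC =====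
def Spec_stringFromLetters (string : String) (letters : List String) (out : String) : Prop := out = stringFromLetters_alt string letters
instance (string : String) (letters : List String) (out : String) : Decidable (Spec_stringFromLetters string letters out) := by unfold Spec_stringFromLetters; infer_instance

-- ===== CLAIM (what is proved, stated in full; the proofs are below) =====
def Claim_equal_stringFromLetters : Prop := ∀ (string : String) (letters : List String), Dom_stringFromLetters string letters → Spec_stringFromLetters string letters (stringFromLetters string letters)

-- ===== LEMMAS AND PROOFS =====

lemma removeLetter_true (e : String) (L : List String) : removeLetter e L true = L := by
  induction L with
  | nil => rfl
  | cons h t ih => simp [removeLetter, ih]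

lemma removeLetter_false (e : String) (L : List String) : removeLetter e L false = L.erase e := by
  induction L with
  | nil => rfl
  | cons h t ih =>
    by_cases hh : h = e
    · simp [removeLetter, hh, removeLetter_true]
    · simp [removeLetter, hh, ih]

lemma letInWord_eq_iff (letters : List String) (c : Char) :
    (letInWord letters (String.ofList [c]) = String.ofList [c]) ↔ String.ofList [c] ∈ letters := by
  have hne : ("" : String) ≠ String.ofList [c] := by
    intro h
    have h2 := congrArg String.toList h
    rw [String.toList_ofList] at h2
    simp at h2
  unfold letInWord
  split_ifs with h1 h2
  · subst h1; simp [hne]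
  · simp [h2]
  · simp [hne, h2]

lemma sflBloop_eq (cs : List Char) (letters : List String) (d : PySem.Dict String Int)
    (acc : List Char) (hinv : ∀ k, d.getD k 0 = (letters.count k : Int)) :
    sflBloop cs d acc = acc ++ sflA cs letters := by
  induction cs generalizing letters d acc with
  | nil => simp [sflBloop, sflA]
  | cons c rest ih =>
    have hcond : (d.getD (String.ofList [c]) 0 > 0) ↔ String.ofList [c] ∈ letters := by
      rw [hinv]
      exact_mod_cast List.count_pos_iff
    by_cases hmem : String.ofList [c] ∈ letters
    · have hpos : d.getD (String.ofList [c]) 0 > 0 := hcond.mpr hmem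
      have hcnt : 1 ≤ letters.count (String.ofList [c]) := List.one_le_count_iff.mpr hmem
      rw [sflBloop, if_pos hpos, sflA, if_pos ((letInWord_eq_iff letters c).mpr hmem),
        removeLetter_false]
      rw [ih (letters.erase (String.ofList [c]))]
      · simp
      · intro k
        rw [PySem.Dict.getD_insert]
        by_cases hk : k = String.ofList [c]
        · subst hk
          rw [if_pos rfl, hinv, List.count_erase_self]
          omega
        · rw [if_neg hk, hinv, List.count_erase_of_ne hk]
    · have hnpos : ¬ d.getD (String.ofList [c]) 0 > 0 := fun h => hmem (hcond.mp h)
      rw [sflBloop, if_neg hnpos, sflA,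
        if_neg (fun h => hmem ((letInWord_eq_iff letters c).mp h))]
      simp

-- ===== VERDICT (by name: the statement is the Claim_ definition above) =====
theorem stringFromLetters_spec : Claim_equal_stringFromLetters := by
  intro string letters _
  unfold Spec_stringFromLetters stringFromLetters stringFromLetters_alt
  congr 1
  rw [sflBloop_eq string.toList letters _ [] (fun k => by
    rw [PySem.Dict.getD_foldl_insert_add_one, PySem.Dict.getD_empty]; simp)]
  simp
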